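-- pv_equiv track=rewrite | github.com/ngj1014/Baekjoon_problem | Baekjoon/Algorithm_Baekjoon_17779.py | gerry
-- ===== SOURCE A (Python) =====
-- def gerry(n,lst,x,y,d1,d2):
--     M=[[0 for _ in range(n)] for _ in range(n)]
--     #5번영역 그림
--     for i in range(d1+1):
--         if not (0<=x+i<n and 0<=y-i <n):
--             return -1
--         M[y-i][x+i] = 5
--
--     for i in range(d1+1):
--         if not (0<=x+d2+i<n and 0<=y+d2-i<n):
--             return -1
--         M[y+d2-i][x+d2+i] = 5
--
--     for i in range(d2+1):
--         if not (0<=x+i<n and 0<=y+i<n):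
--             return -1
--         M[y+i][x+i] = 5
--
--     for i in range(d2+1):
--         if not (0 <= x+d1+i < n and 0 <=y-d1+i<n):
--             return -1
--         M[y-d1+i][x+d1+i]=5
--
--
--
--     #1,2,3,4영역 색칠하기.
--     for c in range(x+d1+1):
--         for r in range(y):
--             if M[r][c]==5:
--                 break
--             M[r][c]=1
--
--     for r in range(y-d1+d2+1):
--         for c in range(n-1,x+d1,-1):
--             if M[r][c]==5:
--                 break
--             M[r][c] = 2
--
--     for c in range(x+d2+2):
--         for r in range(n-1,y-1,-1):
--             if M[r][c] ==5:
--                 break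
--             M[r][c] = 3
--
--     for r in range(y-d1+d2+1,n):
--         for c in range(n-1,x+d2-1,-1):
--             if M[r][c] == 5:
--                 break
--             M[r][c]=4
--
--
--     #인구수 체크
--
--     res=[0,0,0,0,0]
--     for r in range(n):
--         for c in range(n):
--             if M[r][c] == 0 or M[r][c] == 5:
--                 res[0] += lst[r][c]
--             else:
--                 res[M[r][c]] +=lst[r][c]
--
--     return max(res) - min(res)
-- ===== SOURCE B (Python) =====
-- def gerry(n, lst, x, y, d1, d2):
--     # valid selection per the problem: d1,d2 >= 1 and the pentagon fits in the grid
--     if not (d1 >= 1 and d2 >= 1 and 0 <= x and d1 <= y and y + d2 < n and x + d1 + d2 < n):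
--         return -1
--     res = [0, 0, 0, 0, 0]
--     for r in range(n):
--         row = lst[r]
--         for c in range(n):
--             if r + c > x + y + 2 * d2 and r > y - d1 + d2 and c >= x + d2:
--                 k = 4
--             elif r >= y and c <= x + d2 and c - r < x - y:
--                 k = 3
--             elif r <= y - d1 + d2 and c > x + d1 and c - r > x - y + 2 * d1:
--                 k = 2
--             elif r < y and c <= x + d1 and r + c < x + y:
--                 k = 1
--             else:
--                 k = 0
--             res[k] += row[c]
--     return max(res) - min(res)
-- ===== Notes on version B (the rewrite author's own statement) =====
-- stated objective: simpler
-- what changed: B drops A's mutable grid, border-drawing and four break-at-5 fill loops entirely: it validates the selection by the derived closed-form bounds and then classifies every cell directly by the pentagon's diagonal inequalities in a single pass, accumulating the five population sums.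
-- intended difference: On selections with d1 <= 0 or d2 <= 0 (outside the problem's constraint d1,d2 >= 1) that slip past A's partial border checks, A returns a population range (>= 0) computed from a half-drawn border, while B returns -1, the intended answer for an invalid selection. — e.g. on gerry(2, [[1, 2], [3, 4]], 0, 1, 0, 0): A returns 4, B returns -1
import Mathlib
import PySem

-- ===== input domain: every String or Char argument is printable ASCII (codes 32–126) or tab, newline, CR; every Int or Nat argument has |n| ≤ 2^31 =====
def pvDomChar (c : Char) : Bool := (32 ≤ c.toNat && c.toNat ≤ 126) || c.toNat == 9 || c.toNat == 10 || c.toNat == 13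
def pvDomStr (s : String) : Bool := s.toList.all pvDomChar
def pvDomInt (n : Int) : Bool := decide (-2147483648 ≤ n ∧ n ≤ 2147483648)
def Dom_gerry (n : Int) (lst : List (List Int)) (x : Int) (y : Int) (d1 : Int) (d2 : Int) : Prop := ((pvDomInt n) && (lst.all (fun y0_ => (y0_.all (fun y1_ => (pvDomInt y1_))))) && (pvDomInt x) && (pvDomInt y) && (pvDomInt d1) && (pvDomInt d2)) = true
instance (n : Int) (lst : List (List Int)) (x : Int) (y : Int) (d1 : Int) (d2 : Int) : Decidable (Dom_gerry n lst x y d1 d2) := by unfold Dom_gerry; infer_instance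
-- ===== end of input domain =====

-- B replaces A's mutable-grid fills by a direct per-cell classification from the pentagon's
-- boundary inequalities (objective: simpler, one pass, no grid). Return-value equivalence only.

-- ===== PORT A =====
-- A-side helpers: M[r][c] read/write with Python list-index semantics (negative wrap; an
-- out-of-range write is a no-op here — Python raises there, excluded by Pre_).
def pvMget (M : List (List Int)) (r c : Int) : Int :=
  PySem.List.pyGetD (PySem.List.pyGetD M r []) c 0

def pvMset (M : List (List Int)) (r c v : Int) : List (List Int) :=
  PySem.List.pySetD M r (PySem.List.pySetD (PySem.List.pyGetD M r []) c v)

-- one border loop: check "0<=col<n and 0<=row<n", else return -1 (none); write 5.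
-- (fuel = number of remaining loop iterations, so the loop stops at the first failing check
-- exactly as Python's does)
def pvBorder (n : Int) (f : Int → Int × Int) : Nat → Int → List (List Int) → Option (List (List Int))
  | 0, _, M => some M
  | fuel + 1, i, M =>
      if 0 ≤ (f i).1 ∧ (f i).1 < n ∧ 0 ≤ (f i).2 ∧ (f i).2 < n then
        pvBorder n f fuel (i + 1) (pvMset M (f i).2 (f i).1 5)
      else none

-- inner fill loop: walk the cells, break at the first 5, else write v
def pvScan (v : Int) : List (Int × Int) → List (List Int) → List (List Int)
  | [], M => M
  | (r, c) :: rest, M => if pvMget M r c = 5 then M else pvScan v rest (pvMset M r c v)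

-- the body after a successful border phase: the four fills, the population count, max-min
def pvAfter (n : Int) (lst : List (List Int)) (x y d1 d2 : Int) (Mb : List (List Int)) : Int :=
  let M1 := (PySem.List.pyRange 0 (x + d1 + 1) 1).foldl
    (fun M c => pvScan 1 ((PySem.List.pyRange 0 y 1).map (fun r => (r, c))) M) Mb
  let M2 := (PySem.List.pyRange 0 (y - d1 + d2 + 1) 1).foldl
    (fun M r => pvScan 2 ((PySem.List.pyRange (n - 1) (x + d1) (-1)).map (fun c => (r, c))) M) M1
  let M3 := (PySem.List.pyRange 0 (x + d2 + 2) 1).foldl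
    (fun M c => pvScan 3 ((PySem.List.pyRange (n - 1) (y - 1) (-1)).map (fun r => (r, c))) M) M2
  let M4 := (PySem.List.pyRange (y - d1 + d2 + 1) n 1).foldl
    (fun M r => pvScan 4 ((PySem.List.pyRange (n - 1) (x + d2 - 1) (-1)).map (fun c => (r, c))) M) M3
  let res := (PySem.List.pyRange 0 n 1).foldl (fun res r =>
    (PySem.List.pyRange 0 n 1).foldl (fun res c =>
      let m := pvMget M4 r c
      if m = 0 ∨ m = 5 then
        PySem.List.pySetD res 0 (PySem.List.pyGetD res 0 0 + PySem.List.pyGetD (PySem.List.pyGetD lst r []) c 0)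
      else
        PySem.List.pySetD res m (PySem.List.pyGetD res m 0 + PySem.List.pyGetD (PySem.List.pyGetD lst r []) c 0)) res)
    ([0, 0, 0, 0, 0] : List Int)
  (PySem.List.max? res (fun a => a)).getD 0 - (PySem.List.min? res (fun a => a)).getD 0

def gerry (n : Int) (lst : List (List Int)) (x : Int) (y : Int) (d1 : Int) (d2 : Int) : Int :=
  let M0 : List (List Int) :=
    (PySem.List.pyRange 0 n 1).map (fun _ => (PySem.List.pyRange 0 n 1).map (fun _ => (0 : Int)))
  match (pvBorder n (fun i => (x + i, y - i)) (d1 + 1).toNat 0 M0).bind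
        (fun M => (pvBorder n (fun i => (x + d2 + i, y + d2 - i)) (d1 + 1).toNat 0 M).bind
        (fun M => (pvBorder n (fun i => (x + i, y + i)) (d2 + 1).toNat 0 M).bind
        (fun M => pvBorder n (fun i => (x + d1 + i, y - d1 + i)) (d2 + 1).toNat 0 M))) with
  | none => -1
  | some Mb => pvAfter n lst x y d1 d2 Mb

-- ===== PORT B =====
-- B-side helper: the district (0 = district 5 / untouched) of cell (r,c), read off the diagonals
def pvClassify (x y d1 d2 r c : Int) : Int :=
  if r + c > x + y + 2 * d2 ∧ r > y - d1 + d2 ∧ x + d2 ≤ c then 4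
  else if y ≤ r ∧ c ≤ x + d2 ∧ c - r < x - y then 3
  else if r ≤ y - d1 + d2 ∧ x + d1 < c ∧ c - r > x - y + 2 * d1 then 2
  else if r < y ∧ c ≤ x + d1 ∧ r + c < x + y then 1
  else 0

def gerry_alt (n : Int) (lst : List (List Int)) (x : Int) (y : Int) (d1 : Int) (d2 : Int) : Int :=
  if 1 ≤ d1 ∧ 1 ≤ d2 ∧ 0 ≤ x ∧ d1 ≤ y ∧ y + d2 < n ∧ x + d1 + d2 < n then
    let res := (PySem.List.pyRange 0 n 1).foldl (fun res r =>
      let row := PySem.List.pyGetD lst r []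
      (PySem.List.pyRange 0 n 1).foldl (fun res c =>
        let k := pvClassify x y d1 d2 r c
        PySem.List.pySetD res k (PySem.List.pyGetD res k 0 + PySem.List.pyGetD row c 0)) res)
      ([0, 0, 0, 0, 0] : List Int)
    (PySem.List.max? res (fun a => a)).getD 0 - (PySem.List.min? res (fun a => a)).getD 0
  else -1

-- ===== PRECONDITION & SPEC =====
-- exactly the inputs on which A's border checks return -1 (first failing check, per loop)
def Invalid_gerry (n x y d1 d2 : Int) : Prop :=
  (0 ≤ d1 ∧ (x < 0 ∨ n ≤ x + d1 ∨ n ≤ y ∨ y < d1)) ∨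
  (0 ≤ d1 ∧ (x + d2 < 0 ∨ n ≤ x + d1 + d2 ∨ n ≤ y + d2 ∨ y + d2 < d1)) ∨
  (0 ≤ d2 ∧ (x < 0 ∨ n ≤ x + d2 ∨ y < 0 ∨ n ≤ y + d2)) ∨
  (0 ≤ d2 ∧ (x + d1 < 0 ∨ n ≤ x + d1 + d2 ∨ y < d1 ∨ n ≤ y - d1 + d2))

-- exactly the selections that pass the border checks but whose fill loops stay inside the grid
-- (Python indexes out of range — IndexError — otherwise)
def FillSafe_gerry (n x y d1 d2 : Int) : Prop :=
  if 0 ≤ d1 ∨ 0 ≤ d2 then ¬(0 ≤ d2 ∧ x + d2 + 1 = n)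
  else
    ¬(((0 ≤ x + d1 ∧ 1 ≤ y) ∧ (n ≤ x + d1 ∨ n < y)) ∨
      ((0 ≤ y - d1 + d2 ∧ x + d1 + 2 ≤ n) ∧ (n ≤ y - d1 + d2 ∨ x + d1 + 1 < -n)) ∨
      ((0 ≤ x + d2 + 1 ∧ y ≤ n - 1) ∧ (n ≤ x + d2 + 1 ∨ y < -n)) ∨
      ((y - d1 + d2 + 1 ≤ n - 1 ∧ x + d2 ≤ n - 1) ∧ (y - d1 + d2 + 1 < -n ∨ x + d2 < -n)))

-- the population pass reads lst[r][c] for all r,c < n (KeyError/IndexError on a short lst)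
def LstOK_gerry (n : Int) (lst : List (List Int)) : Prop :=
  n ≤ lst.length ∧ ∀ row ∈ lst.take n.toNat, n ≤ (row.length : Int)

-- Pre_ = exactly the inputs on which Python A returns normally: either a border check fails
-- (A returns -1 at once), or all checks pass, the fills stay in range and lst covers the grid.
def Pre_gerry (n : Int) (lst : List (List Int)) (x : Int) (y : Int) (d1 : Int) (d2 : Int) : Prop :=
  Invalid_gerry n x y d1 d2 ∨
  (¬Invalid_gerry n x y d1 d2 ∧ FillSafe_gerry n x y d1 d2 ∧ LstOK_gerry n lst)

instance (n : Int) (lst : List (List Int)) (x : Int) (y : Int) (d1 : Int) (d2 : Int) : Decidable (Pre_gerry n lst x y d1 d2) := by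
  unfold Pre_gerry; unfold Invalid_gerry FillSafe_gerry LstOK_gerry; infer_instance

def pvWitness_gerry : Int × List (List Int) × Int × Int × Int × Int :=
  (3, [[1, 2, 3], [4, 5, 6], [7, 8, 9]], 0, 1, 1, 1)

-- On selections with d1 ≤ 0 or d2 ≤ 0 (outside the problem's constraint d1,d2 ≥ 1) that slip
-- past A's partial border checks, A returns a population range computed from a half-drawn
-- border (≥ 0), while B returns -1, the intended answer for an invalid selection.
def D_gerry (n : Int) (lst : List (List Int)) (x : Int) (y : Int) (d1 : Int) (d2 : Int) : Prop :=
  (d1 ≤ 0 ∨ d2 ≤ 0) ∧ ¬Invalid_gerry n x y d1 d2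

instance (n : Int) (lst : List (List Int)) (x : Int) (y : Int) (d1 : Int) (d2 : Int) : Decidable (D_gerry n lst x y d1 d2) := by
  unfold D_gerry; unfold Invalid_gerry; infer_instance

def Spec_gerry (n : Int) (lst : List (List Int)) (x : Int) (y : Int) (d1 : Int) (d2 : Int) (out : Int) : Prop :=
  ¬D_gerry n lst x y d1 d2 → out = gerry_alt n lst x y d1 d2

instance (n : Int) (lst : List (List Int)) (x : Int) (y : Int) (d1 : Int) (d2 : Int) (out : Int) : Decidable (Spec_gerry n lst x y d1 d2 out) := by
  unfold Spec_gerry; infer_instance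

def pvDiffWitness_gerry : Int × List (List Int) × Int × Int × Int × Int :=
  (2, [[1, 2], [3, 4]], 0, 1, 0, 0)

def pvDiffWitnessOut_gerry : Int × Int := (4, -1)

-- ===== CLAIM (what is proved, stated in full; the proofs are below) =====
def Claim_unchanged_gerry : Prop := ∀ (n : Int) (lst : List (List Int)) (x : Int) (y : Int) (d1 : Int) (d2 : Int), Dom_gerry n lst x y d1 d2 → Pre_gerry n lst x y d1 d2 → Spec_gerry n lst x y d1 d2 (gerry n lst x y d1 d2)

def Claim_changed_gerry : Prop := Dom_gerry (pvDiffWitness_gerry.1) (pvDiffWitness_gerry.2.1) (pvDiffWitness_gerry.2.2.1) (pvDiffWitness_gerry.2.2.2.1) (pvDiffWitness_gerry.2.2.2.2.1) (pvDiffWitness_gerry.2.2.2.2.2) ∧ Pre_gerry (pvDiffWitness_gerry.1) (pvDiffWitness_gerry.2.1) (pvDiffWitness_gerry.2.2.1) (pvDiffWitness_gerry.2.2.2.1) (pvDiffWitness_gerry.2.2.2.2.1) (pvDiffWitness_gerry.2.2.2.2.2) ∧ D_gerry (pvDiffWitness_gerry.1) (pvDiffWitness_gerry.2.1) (pvDiffWitness_gerry.2.2.1)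 (pvDiffWitness_gerry.2.2.2.1) (pvDiffWitness_gerry.2.2.2.2.1) (pvDiffWitness_gerry.2.2.2.2.2) ∧ gerry (pvDiffWitness_gerry.1) (pvDiffWitness_gerry.2.1) (pvDiffWitness_gerry.2.2.1) (pvDiffWitness_gerry.2.2.2.1) (pvDiffWitness_gerry.2.2.2.2.1) (pvDiffWitness_gerry.2.2.2.2.2) = pvDiffWitnessOut_gerry.1 ∧ gerry_alt (pvDiffWitness_gerry.1) (pvDiffWitness_gerry.2.1) (pvDiffWitness_gerry.2.2.1) (pvDiffWitness_gerry.2.2.2.1) (pvDiffWitness_gerry.2.2.2.2.1) (pvDiffWitness_gerry.2.2.2.2.2) = pvDiffWitnessOut_gerry.2 ∧ pvDiffWitnessOut_gerry.1 ≠ pvDiffWitnessOut_gerry.2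

def Claim_exact_gerry : Prop := ∀ (n : Int) (lst : List (List Int)) (x : Int) (y : Int) (d1 : Int) (d2 : Int), Dom_gerry n lst x y d1 d2 → Pre_gerry n lst x y d1 d2 → D_gerry n lst x y d1 d2 → gerry n lst x y d1 d2 ≠ gerry_alt n lst x y d1 d2

-- ===== LEMMAS AND PROOFS =====


-- ---------- grid basics ----------
def pvWF (n : Int) (M : List (List Int)) : Prop :=
  (M.length : Int) = n.toNat ∧ ∀ row ∈ M, (row.length : Int) = n.toNat

theorem pvWF_M0 (n : Int) :
    pvWF n ((PySem.List.pyRange 0 n 1).map (fun _ => (PySem.List.pyRange 0 n 1).map (fun _ => (0 : Int)))) := by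
  constructor
  · simp [PySem.List.length_pyRange_one]
  · intro row hrow
    simp only [List.mem_map] at hrow
    obtain ⟨_, _, rfl⟩ := hrow
    simp [PySem.List.length_pyRange_one]

theorem pvWF_pvMset {n : Int} {M : List (List Int)} (h : pvWF n M) (a b v : Int)
    (ha : 0 ≤ a) (ha2 : a < n) : pvWF n (pvMset M a b v) := by
  obtain ⟨h1, h2⟩ := h
  unfold pvMset
  rw [PySem.List.pySetD_of_nonneg _ _ ha]
  refine ⟨by simpa using h1, ?_⟩
  intro row hrow
  rcases List.mem_or_eq_of_mem_set hrow with hm | rfl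
  · exact h2 _ hm
  · rw [PySem.List.length_pySetD,
      PySem.List.pyGetD_eq_getElem _ _ ha (by omega)]
    exact h2 _ (List.getElem_mem _)

theorem pvMget_pvMset {n : Int} {M : List (List Int)} (h : pvWF n M) {a b : Int} (v : Int)
    (ha : 0 ≤ a) (ha2 : a < n) (hb : 0 ≤ b) (hb2 : b < n) {r c : Int}
    (hr : 0 ≤ r) (hr2 : r < n) (hc : 0 ≤ c) (hc2 : c < n) :
    pvMget (pvMset M a b v) r c = if r = a ∧ c = b then v else pvMget M r c := by
  obtain ⟨h1, h2⟩ := h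
  have hlrow : ∀ (j : Nat) (hj : j < M.length), (M[j].length : Int) = n.toNat :=
    fun j hj => h2 _ (List.getElem_mem _)
  unfold pvMget pvMset
  rw [PySem.List.pySetD_of_nonneg _ _ ha,
    PySem.List.pyGetD_eq_getElem M _ ha (by omega),
    PySem.List.pySetD_of_nonneg _ _ hb,
    PySem.List.pyGetD_eq_getElem (M.set a.toNat _) _ hr (by rw [List.length_set]; omega),
    List.getElem_set]
  by_cases hra : r = a
  · have : a.toNat = r.toNat := by omega
    rw [if_pos this]
    have hcl : c < ((M[a.toNat]'(by omega)).set b.toNat v).length := by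
      rw [List.length_set]; have := hlrow a.toNat (by omega); omega
    rw [PySem.List.pyGetD_eq_getElem _ _ hc (by exact_mod_cast hcl), List.getElem_set,
      PySem.List.pyGetD_eq_getElem M _ hr (by omega)]
    by_cases hcb : c = b
    · rw [if_pos (by omega), if_pos ⟨hra, hcb⟩]
    · subst hra
      rw [if_neg (by omega), if_neg (by tauto),
        PySem.List.pyGetD_eq_getElem _ _ hc (by have := hlrow r.toNat (by omega); omega)]
  · have : ¬ a.toNat = r.toNat := by omega
    rw [if_neg this, if_neg (by tauto), PySem.List.pyGetD_eq_getElem M _ hr (by omega)]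

-- ---------- border phase ----------
-- proof-side list formulation of a border loop, and its bridge to the fuel form
def pvBorderL (n : Int) (f : Int → Int × Int) : List Int → List (List Int) → Option (List (List Int))
  | [], M => some M
  | i :: rest, M =>
      if 0 ≤ (f i).1 ∧ (f i).1 < n ∧ 0 ≤ (f i).2 ∧ (f i).2 < n then
        pvBorderL n f rest (pvMset M (f i).2 (f i).1 5)
      else none

theorem pvBorder_eq_listAux (n : Int) (f : Int → Int × Int) (k : Nat) :
    ∀ (i : Int) (M : List (List Int)),
      pvBorder n f k i M = pvBorderL n f (PySem.List.pyRange i (i + k) 1) M := by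
  induction k with
  | zero =>
    intro i M
    rw [pvBorder, PySem.List.pyRange_one_eq_nil (by omega), pvBorderL]
  | succ k ih =>
    intro i M
    rw [pvBorder, PySem.List.pyRange_one_cons (by omega), pvBorderL]
    by_cases h : 0 ≤ (f i).1 ∧ (f i).1 < n ∧ 0 ≤ (f i).2 ∧ (f i).2 < n
    · rw [if_pos h, if_pos h, ih (i + 1), show i + 1 + (k : Int) = i + ((k : Nat) + 1 : Nat) from by push_cast; ring]
    · rw [if_neg h, if_neg h]

theorem pvBorder_eq_list (n : Int) (f : Int → Int × Int) (d : Int) (M : List (List Int)) :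
    pvBorder n f (d + 1).toNat 0 M = pvBorderL n f (PySem.List.pyRange 0 (d + 1) 1) M := by
  rw [pvBorder_eq_listAux n f (d + 1).toNat 0 M,
    show (0 : Int) + ((d + 1).toNat : Int) = ((d + 1).toNat : Int) from by omega]
  by_cases h : 0 ≤ d + 1
  · rw [show (((d + 1).toNat : Int)) = d + 1 from by omega]
  · rw [PySem.List.pyRange_one_eq_nil (by omega), PySem.List.pyRange_one_eq_nil (by omega)]

theorem pvBorder_some (n : Int) (f : Int → Int × Int) (is : List Int) (M : List (List Int))
    (h : ∀ i ∈ is, 0 ≤ (f i).1 ∧ (f i).1 < n ∧ 0 ≤ (f i).2 ∧ (f i).2 < n) :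
    pvBorderL n f is M = some (is.foldl (fun M i => pvMset M (f i).2 (f i).1 5) M) := by
  induction is generalizing M with
  | nil => rfl
  | cons i rest ih =>
    rw [pvBorderL, if_pos (h i (by simp))]
    exact ih _ (fun j hj => h j (by simp [hj]))

theorem pvBorder_none (n : Int) (f : Int → Int × Int) (is : List Int) (M : List (List Int))
    (h : ∃ i ∈ is, ¬(0 ≤ (f i).1 ∧ (f i).1 < n ∧ 0 ≤ (f i).2 ∧ (f i).2 < n)) :
    pvBorderL n f is M = none := by
  induction is generalizing M with
  | nil => simp at h
  | cons i rest ih =>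
    by_cases hi : 0 ≤ (f i).1 ∧ (f i).1 < n ∧ 0 ≤ (f i).2 ∧ (f i).2 < n
    · rw [pvBorderL, if_pos hi]
      refine ih _ ?_
      obtain ⟨j, hj, hjf⟩ := h
      rcases List.mem_cons.mp hj with rfl | hj'
      · exact absurd hi hjf
      · exact ⟨j, hj', hjf⟩
    · rw [pvBorderL, if_neg hi]

theorem pvFoldMset_char {n : Int} (f : Int → Int × Int) (is : List Int)
    {M : List (List Int)} {g : Int → Int → Int} (hWF : pvWF n M)
    (hin : ∀ i ∈ is, 0 ≤ (f i).1 ∧ (f i).1 < n ∧ 0 ≤ (f i).2 ∧ (f i).2 < n)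
    (hchar : ∀ r c, 0 ≤ r → r < n → 0 ≤ c → c < n → pvMget M r c = g r c) :
    pvWF n (is.foldl (fun M i => pvMset M (f i).2 (f i).1 5) M) ∧
    ∀ r c, 0 ≤ r → r < n → 0 ≤ c → c < n →
      pvMget (is.foldl (fun M i => pvMset M (f i).2 (f i).1 5) M) r c =
        if ∃ i ∈ is, (f i).2 = r ∧ (f i).1 = c then 5 else g r c := by
  induction is generalizing M g with
  | nil => exact ⟨hWF, by simpa using hchar⟩
  | cons i rest ih =>
    obtain ⟨hi1, hi2, hi3, hi4⟩ := hin i (by simp)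
    have hWF' : pvWF n (pvMset M (f i).2 (f i).1 5) := pvWF_pvMset hWF _ _ _ hi3 hi4
    have hchar' : ∀ r c, 0 ≤ r → r < n → 0 ≤ c → c < n →
        pvMget (pvMset M (f i).2 (f i).1 5) r c =
          (fun r c => if (f i).2 = r ∧ (f i).1 = c then 5 else g r c) r c := by
      intro r c hr hr2 hc hc2
      rw [pvMget_pvMset ⟨hWF.1, hWF.2⟩ 5 hi3 hi4 hi1 hi2 hr hr2 hc hc2]
      simp only [hchar r c hr hr2 hc hc2]
      by_cases h' : r = (f i).2 ∧ c = (f i).1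
      · rw [if_pos h', if_pos ⟨h'.1.symm, h'.2.symm⟩]
      · rw [if_neg h', if_neg (by tauto)]
    obtain ⟨hWFr, hcharr⟩ := ih hWF' (fun j hj => hin j (by simp [hj])) hchar'
    refine ⟨hWFr, ?_⟩
    intro r c hr hr2 hc hc2
    rw [List.foldl_cons] at *
    rw [hcharr r c hr hr2 hc hc2]
    by_cases he : ∃ j ∈ rest, (f j).2 = r ∧ (f j).1 = c
    · rw [if_pos he, if_pos (by obtain ⟨j, hj, hjf⟩ := he; exact ⟨j, by simp [hj], hjf⟩)]
    · rw [if_neg he]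
      by_cases hh : (f i).2 = r ∧ (f i).1 = c
      · rw [if_pos hh, if_pos ⟨i, by simp, hh⟩]
      · rw [if_neg hh, if_neg (by
          rintro ⟨j, hj, hjf⟩
          rcases List.mem_cons.mp hj with rfl | hj'
          · exact hh hjf
          · exact he ⟨j, hj', hjf⟩)]

-- ---------- the four border loops: failure and coverage, in closed form ----------
theorem pvFail1_iff (n x y d1 : Int) :
    (∃ i ∈ PySem.List.pyRange 0 (d1 + 1) 1,
        ¬(0 ≤ ((fun i => (x + i, y - i)) i).1 ∧ ((fun i => (x + i, y - i)) i).1 < n ∧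
          0 ≤ ((fun i => (x + i, y - i)) i).2 ∧ ((fun i => (x + i, y - i)) i).2 < n)) ↔
    (0 ≤ d1 ∧ (x < 0 ∨ n ≤ x + d1 ∨ n ≤ y ∨ y < d1)) := by
  constructor
  · rintro ⟨i, hi, h⟩
    rw [PySem.List.mem_pyRange_one] at hi
    simp only at h
    omega
  · rintro ⟨hd, h' | h' | h' | h'⟩
    · exact ⟨0, by rw [PySem.List.mem_pyRange_one]; omega, by simp only; omega⟩
    · exact ⟨d1, by rw [PySem.List.mem_pyRange_one]; omega, by simp only; omega⟩
    · exact ⟨0, by rw [PySem.List.mem_pyRange_one]; omega, by simp only; omega⟩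
    · exact ⟨d1, by rw [PySem.List.mem_pyRange_one]; omega, by simp only; omega⟩

theorem pvFail2_iff (n x y d1 d2 : Int) :
    (∃ i ∈ PySem.List.pyRange 0 (d1 + 1) 1,
        ¬(0 ≤ ((fun i => (x + d2 + i, y + d2 - i)) i).1 ∧ ((fun i => (x + d2 + i, y + d2 - i)) i).1 < n ∧
          0 ≤ ((fun i => (x + d2 + i, y + d2 - i)) i).2 ∧ ((fun i => (x + d2 + i, y + d2 - i)) i).2 < n)) ↔
    (0 ≤ d1 ∧ (x + d2 < 0 ∨ n ≤ x + d1 + d2 ∨ n ≤ y + d2 ∨ y + d2 < d1)) := by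
  constructor
  · rintro ⟨i, hi, h⟩
    rw [PySem.List.mem_pyRange_one] at hi
    simp only at h
    omega
  · rintro ⟨hd, h' | h' | h' | h'⟩
    · exact ⟨0, by rw [PySem.List.mem_pyRange_one]; omega, by simp only; omega⟩
    · exact ⟨d1, by rw [PySem.List.mem_pyRange_one]; omega, by simp only; omega⟩
    · exact ⟨0, by rw [PySem.List.mem_pyRange_one]; omega, by simp only; omega⟩
    · exact ⟨d1, by rw [PySem.List.mem_pyRange_one]; omega, by simp only; omega⟩

theorem pvFail3_iff (n x y d2 : Int) :
    (∃ i ∈ PySem.List.pyRange 0 (d2 + 1) 1,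
        ¬(0 ≤ ((fun i => (x + i, y + i)) i).1 ∧ ((fun i => (x + i, y + i)) i).1 < n ∧
          0 ≤ ((fun i => (x + i, y + i)) i).2 ∧ ((fun i => (x + i, y + i)) i).2 < n)) ↔
    (0 ≤ d2 ∧ (x < 0 ∨ n ≤ x + d2 ∨ y < 0 ∨ n ≤ y + d2)) := by
  constructor
  · rintro ⟨i, hi, h⟩
    rw [PySem.List.mem_pyRange_one] at hi
    simp only at h
    omega
  · rintro ⟨hd, h' | h' | h' | h'⟩
    · exact ⟨0, by rw [PySem.List.mem_pyRange_one]; omega, by simp only; omega⟩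
    · exact ⟨d2, by rw [PySem.List.mem_pyRange_one]; omega, by simp only; omega⟩
    · exact ⟨0, by rw [PySem.List.mem_pyRange_one]; omega, by simp only; omega⟩
    · exact ⟨d2, by rw [PySem.List.mem_pyRange_one]; omega, by simp only; omega⟩

theorem pvFail4_iff (n x y d1 d2 : Int) :
    (∃ i ∈ PySem.List.pyRange 0 (d2 + 1) 1,
        ¬(0 ≤ ((fun i => (x + d1 + i, y - d1 + i)) i).1 ∧ ((fun i => (x + d1 + i, y - d1 + i)) i).1 < n ∧
          0 ≤ ((fun i => (x + d1 + i, y - d1 + i)) i).2 ∧ ((fun i => (x + d1 + i, y - d1 + i)) i).2 < n)) ↔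
    (0 ≤ d2 ∧ (x + d1 < 0 ∨ n ≤ x + d1 + d2 ∨ y < d1 ∨ n ≤ y - d1 + d2)) := by
  constructor
  · rintro ⟨i, hi, h⟩
    rw [PySem.List.mem_pyRange_one] at hi
    simp only at h
    omega
  · rintro ⟨hd, h' | h' | h' | h'⟩
    · exact ⟨0, by rw [PySem.List.mem_pyRange_one]; omega, by simp only; omega⟩
    · exact ⟨d2, by rw [PySem.List.mem_pyRange_one]; omega, by simp only; omega⟩
    · exact ⟨0, by rw [PySem.List.mem_pyRange_one]; omega, by simp only; omega⟩
    · exact ⟨d2, by rw [PySem.List.mem_pyRange_one]; omega, by simp only; omega⟩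

-- ---------- the drawn border, in closed form ----------
abbrev pvBdry (x y d1 d2 r c : Int) : Prop :=
  (x ≤ c ∧ c ≤ x + d1 ∧ r + c = x + y) ∨
  (x + d2 ≤ c ∧ c ≤ x + d1 + d2 ∧ r + c = x + y + 2 * d2) ∨
  (x ≤ c ∧ c ≤ x + d2 ∧ c - r = x - y) ∨
  (x + d1 ≤ c ∧ c ≤ x + d1 + d2 ∧ c - r = x - y + 2 * d1)

-- the full border phase: under ¬Invalid it succeeds, yielding a grid whose in-range cells
-- hold 5 exactly on the closed-form border and 0 elsewhere
set_option maxHeartbeats 1000000 in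
theorem pvBorders_char (n x y d1 d2 : Int) (hni : ¬Invalid_gerry n x y d1 d2) :
    ∃ Mb,
      ((pvBorder n (fun i => (x + i, y - i)) (d1 + 1).toNat 0
          ((PySem.List.pyRange 0 n 1).map (fun _ => (PySem.List.pyRange 0 n 1).map (fun _ => (0 : Int))))).bind
        (fun M => (pvBorder n (fun i => (x + d2 + i, y + d2 - i)) (d1 + 1).toNat 0 M).bind
        (fun M => (pvBorder n (fun i => (x + i, y + i)) (d2 + 1).toNat 0 M).bind
        (fun M => pvBorder n (fun i => (x + d1 + i, y - d1 + i)) (d2 + 1).toNat 0 M)))) = some Mb ∧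
      pvWF n Mb ∧
      ∀ r c, 0 ≤ r → r < n → 0 ≤ c → c < n →
        pvMget Mb r c = if pvBdry x y d1 d2 r c then 5 else 0 := by
  simp only [pvBorder_eq_list]
  unfold Invalid_gerry at hni
  have hok1 : ∀ i ∈ PySem.List.pyRange 0 (d1 + 1) 1,
      0 ≤ ((fun i => (x + i, y - i)) i).1 ∧ ((fun i => (x + i, y - i)) i).1 < n ∧
      0 ≤ ((fun i => (x + i, y - i)) i).2 ∧ ((fun i => (x + i, y - i)) i).2 < n := by
    intro i hi; by_contra hc
    exact hni (Or.inl ((pvFail1_iff n x y d1).mp ⟨i, hi, hc⟩))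
  have hok2 : ∀ i ∈ PySem.List.pyRange 0 (d1 + 1) 1,
      0 ≤ ((fun i => (x + d2 + i, y + d2 - i)) i).1 ∧ ((fun i => (x + d2 + i, y + d2 - i)) i).1 < n ∧
      0 ≤ ((fun i => (x + d2 + i, y + d2 - i)) i).2 ∧ ((fun i => (x + d2 + i, y + d2 - i)) i).2 < n := by
    intro i hi; by_contra hc
    exact hni (Or.inr (Or.inl ((pvFail2_iff n x y d1 d2).mp ⟨i, hi, hc⟩)))
  have hok3 : ∀ i ∈ PySem.List.pyRange 0 (d2 + 1) 1,
      0 ≤ ((fun i => (x + i, y + i)) i).1 ∧ ((fun i => (x + i, y + i)) i).1 < n ∧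
      0 ≤ ((fun i => (x + i, y + i)) i).2 ∧ ((fun i => (x + i, y + i)) i).2 < n := by
    intro i hi; by_contra hc
    exact hni (Or.inr (Or.inr (Or.inl ((pvFail3_iff n x y d2).mp ⟨i, hi, hc⟩))))
  have hok4 : ∀ i ∈ PySem.List.pyRange 0 (d2 + 1) 1,
      0 ≤ ((fun i => (x + d1 + i, y - d1 + i)) i).1 ∧ ((fun i => (x + d1 + i, y - d1 + i)) i).1 < n ∧
      0 ≤ ((fun i => (x + d1 + i, y - d1 + i)) i).2 ∧ ((fun i => (x + d1 + i, y - d1 + i)) i).2 < n := by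
    intro i hi; by_contra hc
    exact hni (Or.inr (Or.inr (Or.inr ((pvFail4_iff n x y d1 d2).mp ⟨i, hi, hc⟩))))
  rw [pvBorder_some _ _ _ _ hok1]
  obtain ⟨hW1, hc1⟩ := pvFoldMset_char (n := n) _ _ (pvWF_M0 n) hok1
    (g := fun _ _ => 0) (by
      intro r c hr hr2 hc hc2
      unfold pvMget
      rw [PySem.List.pyGetD_eq_getElem _ _ hr (by simp [PySem.List.length_pyRange_one]; omega)]
      rw [List.getElem_map]
      rw [PySem.List.pyGetD_eq_getElem _ _ hc (by simp [PySem.List.length_pyRange_one]; omega)]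
      rw [List.getElem_map])
  rw [Option.bind_some _ _, pvBorder_some _ _ _ _ hok2]
  obtain ⟨hW2, hc2'⟩ := pvFoldMset_char (n := n) _ _ hW1 hok2 hc1
  rw [Option.bind_some _ _, pvBorder_some _ _ _ _ hok3]
  obtain ⟨hW3, hc3'⟩ := pvFoldMset_char (n := n) _ _ hW2 hok3 hc2'
  rw [Option.bind_some _ _, pvBorder_some _ _ _ _ hok4]
  obtain ⟨hW4, hc4'⟩ := pvFoldMset_char (n := n) _ _ hW3 hok4 hc3'
  refine ⟨_, rfl, hW4, ?_⟩
  intro r c hr hr2 hc hc2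
  rw [hc4' r c hr hr2 hc hc2]
  have e4 : (∃ i ∈ PySem.List.pyRange 0 (d2 + 1) 1,
      ((fun i => (x + d1 + i, y - d1 + i)) i).2 = r ∧ ((fun i => (x + d1 + i, y - d1 + i)) i).1 = c) ↔
      (x + d1 ≤ c ∧ c ≤ x + d1 + d2 ∧ c - r = x - y + 2 * d1) := by
    constructor
    · rintro ⟨i, hi, h1, h2⟩
      rw [PySem.List.mem_pyRange_one] at hi
      simp only at h1 h2
      omega
    · intro hcl
      exact ⟨c - (x + d1), by rw [PySem.List.mem_pyRange_one]; omega, by simp only; omega,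
        by simp only; omega⟩
  have e3 : (∃ i ∈ PySem.List.pyRange 0 (d2 + 1) 1,
      ((fun i => (x + i, y + i)) i).2 = r ∧ ((fun i => (x + i, y + i)) i).1 = c) ↔
      (x ≤ c ∧ c ≤ x + d2 ∧ c - r = x - y) := by
    constructor
    · rintro ⟨i, hi, h1, h2⟩
      rw [PySem.List.mem_pyRange_one] at hi
      simp only at h1 h2
      omega
    · intro hcl
      exact ⟨c - x, by rw [PySem.List.mem_pyRange_one]; omega, by simp only; omega,
        by simp only; omega⟩
  have e2 : (∃ i ∈ PySem.List.pyRange 0 (d1 + 1) 1,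
      ((fun i => (x + d2 + i, y + d2 - i)) i).2 = r ∧ ((fun i => (x + d2 + i, y + d2 - i)) i).1 = c) ↔
      (x + d2 ≤ c ∧ c ≤ x + d1 + d2 ∧ r + c = x + y + 2 * d2) := by
    constructor
    · rintro ⟨i, hi, h1, h2⟩
      rw [PySem.List.mem_pyRange_one] at hi
      simp only at h1 h2
      omega
    · intro hcl
      exact ⟨c - (x + d2), by rw [PySem.List.mem_pyRange_one]; omega, by simp only; omega,
        by simp only; omega⟩
  have e1 : (∃ i ∈ PySem.List.pyRange 0 (d1 + 1) 1,
      ((fun i => (x + i, y - i)) i).2 = r ∧ ((fun i => (x + i, y - i)) i).1 = c) ↔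
      (x ≤ c ∧ c ≤ x + d1 ∧ r + c = x + y) := by
    constructor
    · rintro ⟨i, hi, h1, h2⟩
      rw [PySem.List.mem_pyRange_one] at hi
      simp only at h1 h2
      omega
    · intro hcl
      exact ⟨c - x, by rw [PySem.List.mem_pyRange_one]; omega, by simp only; omega,
        by simp only; omega⟩
  rw [if_congr e4 rfl rfl, if_congr e3 rfl rfl, if_congr e2 rfl rfl, if_congr e1 rfl rfl]
  unfold pvBdry
  split_ifs <;> omega

-- under Invalid the border phase returns -1 (the chain is none)
theorem pvChain_none (n x y d1 d2 : Int) (M0 : List (List Int)) (h : Invalid_gerry n x y d1 d2) :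
    ((pvBorder n (fun i => (x + i, y - i)) (d1 + 1).toNat 0 M0).bind
      (fun M => (pvBorder n (fun i => (x + d2 + i, y + d2 - i)) (d1 + 1).toNat 0 M).bind
      (fun M => (pvBorder n (fun i => (x + i, y + i)) (d2 + 1).toNat 0 M).bind
      (fun M => pvBorder n (fun i => (x + d1 + i, y - d1 + i)) (d2 + 1).toNat 0 M)))) = none := by
  simp only [pvBorder_eq_list]
  unfold Invalid_gerry at h
  by_cases h1 : 0 ≤ d1 ∧ (x < 0 ∨ n ≤ x + d1 ∨ n ≤ y ∨ y < d1)
  · rw [pvBorder_none _ _ _ _ ((pvFail1_iff n x y d1).mpr h1), Option.bind_none]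
  rw [pvBorder_some _ _ _ _ (by
    intro i hi; by_contra hc; exact h1 ((pvFail1_iff n x y d1).mp ⟨i, hi, hc⟩)), Option.bind_some _ _]
  by_cases h2 : 0 ≤ d1 ∧ (x + d2 < 0 ∨ n ≤ x + d1 + d2 ∨ n ≤ y + d2 ∨ y + d2 < d1)
  · rw [pvBorder_none _ _ _ _ ((pvFail2_iff n x y d1 d2).mpr h2), Option.bind_none]
  rw [pvBorder_some _ _ _ _ (by
    intro i hi; by_contra hc; exact h2 ((pvFail2_iff n x y d1 d2).mp ⟨i, hi, hc⟩)), Option.bind_some _ _]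
  by_cases h3 : 0 ≤ d2 ∧ (x < 0 ∨ n ≤ x + d2 ∨ y < 0 ∨ n ≤ y + d2)
  · rw [pvBorder_none _ _ _ _ ((pvFail3_iff n x y d2).mpr h3), Option.bind_none]
  rw [pvBorder_some _ _ _ _ (by
    intro i hi; by_contra hc; exact h3 ((pvFail3_iff n x y d2).mp ⟨i, hi, hc⟩)), Option.bind_some _ _]
  exact pvBorder_none _ _ _ _ ((pvFail4_iff n x y d1 d2).mpr (by tauto))

-- ---------- scan-with-break machinery ----------
-- (List.takeWhile congruence: not found in Mathlib by exact?, so proved here)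
theorem pvTakeWhile_congr {α : Type} {p q : α → Bool} {l : List α}
    (h : ∀ a ∈ l, p a = q a) : l.takeWhile p = l.takeWhile q := by
  induction l with
  | nil => rfl
  | cons a l ih =>
    rw [List.takeWhile_cons, List.takeWhile_cons, h a (by simp)]
    by_cases hq : q a = true
    · rw [hq]
      simp only [ih (fun b hb => h b (by simp [hb]))]
    · rw [Bool.not_eq_true] at hq
      rw [hq]
      simp

theorem pvTakeWhile_pyRange_one (P : Int → Bool) (a m b : Int) (h1 : a ≤ m) (h2 : m ≤ b)
    (hall : ∀ i, a ≤ i → i < m → P i = true) (hm : m < b → P m = false) :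
    (PySem.List.pyRange a b 1).takeWhile P = PySem.List.pyRange a m 1 := by
  have hk : ∃ k : Nat, m - a = k := ⟨(m - a).toNat, by omega⟩
  obtain ⟨k, hk⟩ := hk
  induction k generalizing a with
  | zero =>
    have : a = m := by omega
    subst this
    by_cases hab : a < b
    · rw [PySem.List.pyRange_one_cons hab, List.takeWhile_cons, hm hab]
      simp [PySem.List.pyRange_one_eq_nil (le_refl a)]
    · rw [PySem.List.pyRange_one_eq_nil (by omega), PySem.List.pyRange_one_eq_nil (le_refl a)]
      rfl
  | succ k ih =>
    rw [PySem.List.pyRange_one_cons (by omega), List.takeWhile_cons, hall a (by omega) (by omega)]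
    rw [ih (a + 1) (by omega) (fun i hi hi2 => hall i (by omega) hi2) (by omega),
      PySem.List.pyRange_one_cons (show a < m by omega)]
    simp

theorem pvTakeWhile_pyRange_neg_one (P : Int → Bool) (a m b : Int) (h1 : b ≤ m) (h2 : m ≤ a)
    (hall : ∀ i, m < i → i ≤ a → P i = true) (hm : b < m → P m = false) :
    (PySem.List.pyRange a b (-1)).takeWhile P = PySem.List.pyRange a m (-1) := by
  have hk : ∃ k : Nat, a - m = k := ⟨(a - m).toNat, by omega⟩
  obtain ⟨k, hk⟩ := hk
  induction k generalizing a with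
  | zero =>
    have : a = m := by omega
    subst this
    by_cases hab : b < a
    · rw [PySem.List.pyRange_neg_one_cons hab, List.takeWhile_cons, hm hab]
      simp [PySem.List.pyRange_neg_one_eq_nil (le_refl a)]
    · rw [PySem.List.pyRange_neg_one_eq_nil (by omega), PySem.List.pyRange_neg_one_eq_nil (le_refl a)]
      rfl
  | succ k ih =>
    rw [PySem.List.pyRange_neg_one_cons (by omega), List.takeWhile_cons, hall a (by omega) (by omega)]
    rw [ih (a - 1) (by omega) (fun i hi hi2 => hall i (by omega) (by omega)) (by omega),
      PySem.List.pyRange_neg_one_cons (show m < a by omega)]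
    simp

theorem pvScan_char {n : Int} (v : Int) (hv : v ≠ 5) (cells : List (Int × Int))
    {M : List (List Int)} (hWF : pvWF n M)
    (hin : ∀ p ∈ cells, 0 ≤ p.1 ∧ p.1 < n ∧ 0 ≤ p.2 ∧ p.2 < n) (hnd : cells.Nodup) :
    pvWF n (pvScan v cells M) ∧
    ∀ r c, 0 ≤ r → r < n → 0 ≤ c → c < n →
      pvMget (pvScan v cells M) r c =
        if (r, c) ∈ cells.takeWhile (fun p => decide (pvMget M p.1 p.2 ≠ 5)) then v
        else pvMget M r c := by
  induction cells generalizing M with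
  | nil => exact ⟨hWF, by intro r c _ _ _ _; rw [if_neg (by simp)]; rfl⟩
  | cons q rest ih =>
    obtain ⟨a, b⟩ := q
    obtain ⟨hq1, hq2, hq3, hq4⟩ := hin (a, b) (by simp)
    simp only at hq1 hq2 hq3 hq4
    rw [List.takeWhile_cons]
    by_cases h5 : pvMget M a b = 5
    · rw [pvScan, if_pos h5]
      refine ⟨hWF, ?_⟩
      intro r c _ _ _ _
      rw [if_neg (by simp [h5])]
    · have hM' : pvWF n (pvMset M a b v) := pvWF_pvMset hWF _ _ _ hq1 hq2
      have hget' : ∀ r c, 0 ≤ r → r < n → 0 ≤ c → c < n →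
          pvMget (pvMset M a b v) r c = if r = a ∧ c = b then v else pvMget M r c :=
        fun r c hr hr2 hc hc2 => pvMget_pvMset hWF v hq1 hq2 hq3 hq4 hr hr2 hc hc2
      obtain ⟨hWFr, hcharr⟩ := ih hM' (fun p hp => hin p (by simp [hp]))
        (List.Nodup.of_cons hnd)
      have htw : rest.takeWhile (fun p => decide (pvMget (pvMset M a b v) p.1 p.2 ≠ 5)) =
          rest.takeWhile (fun p => decide (pvMget M p.1 p.2 ≠ 5)) := by
        refine pvTakeWhile_congr ?_
        intro p hp
        obtain ⟨hp1, hp2, hp3, hp4⟩ := hin p (by simp [hp])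
        have hpq : ¬(p.1 = a ∧ p.2 = b) := by
          intro hh
          have : p = (a, b) := by
            obtain ⟨pa, pb⟩ := p
            simp only at hh
            simp [hh.1, hh.2]
          rw [List.nodup_cons] at hnd
          exact hnd.1 (this ▸ hp)
        rw [hget' p.1 p.2 hp1 hp2 hp3 hp4, if_neg hpq]
      rw [pvScan, if_neg h5]
      refine ⟨hWFr, ?_⟩
      intro r c hr hr2 hc hc2
      rw [hcharr r c hr hr2 hc hc2, htw]
      simp only [decide_not, h5, decide_false, Bool.not_false, if_true, List.mem_cons]
      by_cases hrc : (r, c) = (a, b)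
      · have hra : r = a := by injection hrc
        have hcb : c = b := by injection hrc
        rw [if_pos (Or.inl hrc)]
        rw [if_neg (by
          intro hmem
          rw [List.nodup_cons] at hnd
          exact hnd.1 (hrc ▸ List.Sublist.mem hmem (List.takeWhile_sublist _)))]
        rw [hget' r c hr hr2 hc hc2, if_pos ⟨hra, hcb⟩]
      · by_cases hmem : (r, c) ∈ rest.takeWhile (fun p => !decide (pvMget M p.1 p.2 = 5))
        · rw [if_pos (Or.inr hmem), if_pos hmem]
        · rw [if_neg hmem,
            if_neg (show ¬((r, c) = (a, b) ∨
              (r, c) ∈ rest.takeWhile (fun p => !decide (pvMget M p.1 p.2 = 5))) from by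
              rintro (h | h)
              · exact hrc h
              · exact hmem h)]
          rw [hget' r c hr hr2 hc hc2, if_neg (by
            intro hh
            exact hrc (by obtain ⟨h1, h2⟩ := hh; rw [h1, h2]))]

-- one fill pass = fold of break-scans along disjoint lines
theorem pvFoldScan_char {n : Int} (v : Int) (hv : v ≠ 5) (A B : Int)
    (line : Int → List (Int × Int)) (W : Int → Int → Int → Prop)
    [inst : ∀ t r c, Decidable (W t r c)]
    {M : List (List Int)} {g : Int → Int → Int}
    (hWF : pvWF n M)
    (hchar : ∀ r c, 0 ≤ r → r < n → 0 ≤ c → c < n → pvMget M r c = g r c)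
    (hlin : ∀ t, A ≤ t → t < B →
      (∀ p ∈ line t, 0 ≤ p.1 ∧ p.1 < n ∧ 0 ≤ p.2 ∧ p.2 < n) ∧ (line t).Nodup)
    (hdisj : ∀ t t', A ≤ t → t < B → A ≤ t' → t' < B → t' ≠ t → ∀ p ∈ line t, ¬W t' p.1 p.2)
    (hW : ∀ t, A ≤ t → t < B → ∀ r c, 0 ≤ r → r < n → 0 ≤ c → c < n →
      ((r, c) ∈ (line t).takeWhile (fun p => !decide (g p.1 p.2 = 5)) ↔ W t r c)) :
    pvWF n ((PySem.List.pyRange A B 1).foldl (fun M t => pvScan v (line t) M) M) ∧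
    ∀ r c, 0 ≤ r → r < n → 0 ≤ c → c < n →
      pvMget ((PySem.List.pyRange A B 1).foldl (fun M t => pvScan v (line t) M) M) r c =
        if ∃ t ∈ PySem.List.pyRange A B 1, W t r c then v else g r c := by
  have hk : ∃ k : Nat, B - A = k ∨ B ≤ A := by
    by_cases h : B ≤ A
    · exact ⟨0, Or.inr h⟩
    · exact ⟨(B - A).toNat, Or.inl (by omega)⟩
  obtain ⟨k, hk⟩ := hk
  induction k generalizing A M g with
  | zero =>
    have hBA : B ≤ A := by omega
    rw [PySem.List.pyRange_one_eq_nil hBA]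
    refine ⟨hWF, ?_⟩
    intro r c hr hr2 hc hc2
    rw [List.foldl_nil, if_neg (by simp), hchar r c hr hr2 hc hc2]
  | succ k ih =>
    rcases hk with hk | hBA
    swap
    · rw [PySem.List.pyRange_one_eq_nil hBA]
      refine ⟨hWF, ?_⟩
      intro r c hr hr2 hc hc2
      rw [List.foldl_nil, if_neg (by simp), hchar r c hr hr2 hc hc2]
    have hAB : A < B := by omega
    rw [PySem.List.pyRange_one_cons hAB, List.foldl_cons]
    obtain ⟨hinA, hndA⟩ := hlin A (le_refl A) hAB
    obtain ⟨hWF', hchar'⟩ := pvScan_char (n := n) v hv (line A) hWF hinA hndA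
    have hpredA : (line A).takeWhile (fun p => !decide (pvMget M p.1 p.2 = 5)) =
        (line A).takeWhile (fun p => !decide (g p.1 p.2 = 5)) := by
      refine pvTakeWhile_congr ?_
      intro p hp
      obtain ⟨h1, h2, h3, h4⟩ := hinA p hp
      rw [hchar p.1 p.2 h1 h2 h3 h4]
    have hchar'' : ∀ r c, 0 ≤ r → r < n → 0 ≤ c → c < n →
        pvMget (pvScan v (line A) M) r c = (fun r c => if W A r c then v else g r c) r c := by
      intro r c hr hr2 hc hc2
      rw [hchar' r c hr hr2 hc hc2]
      simp only [decide_not] at hpredA ⊢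
      rw [hpredA]
      by_cases hw : W A r c
      · rw [if_pos ((hW A (le_refl A) hAB r c hr hr2 hc hc2).mpr hw), if_pos hw]
      · rw [if_neg (fun hh => hw ((hW A (le_refl A) hAB r c hr hr2 hc hc2).mp hh)), if_neg hw,
          hchar r c hr hr2 hc hc2]
    have hg'5 : ∀ t, A + 1 ≤ t → t < B → ∀ p ∈ line t,
        (fun r c => if W A r c then v else g r c) p.1 p.2 = g p.1 p.2 := by
      intro t ht1 ht2 p hp
      simp only
      rw [if_neg (hdisj t A (by omega) ht2 (le_refl A) hAB (by omega) p hp)]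
    obtain ⟨hWFr, hcharr⟩ := ih (A + 1)
      (g := fun r c => if W A r c then v else g r c) hWF' hchar''
      (fun t ht1 ht2 => hlin t (by omega) ht2)
      (fun t t' ht1 ht2 ht3 ht4 hne => hdisj t t' (by omega) ht2 (by omega) ht4 hne)
      (by
        intro t ht1 ht2 r c hr hr2 hc hc2
        rw [show (line t).takeWhile (fun p => !decide ((fun r c => if W A r c then v else g r c) p.1 p.2 = 5)) =
            (line t).takeWhile (fun p => !decide (g p.1 p.2 = 5)) from
          pvTakeWhile_congr (fun p hp => by rw [hg'5 t ht1 ht2 p hp])]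
        exact hW t (by omega) ht2 r c hr hr2 hc hc2)
      (by omega)
    refine ⟨hWFr, ?_⟩
    intro r c hr hr2 hc hc2
    rw [hcharr r c hr hr2 hc hc2]
    by_cases he : ∃ t ∈ PySem.List.pyRange (A + 1) B 1, W t r c
    · rw [if_pos he, if_pos (by
        obtain ⟨t, ht, hw⟩ := he
        exact ⟨t, List.mem_cons_of_mem _ ht, hw⟩)]
    · rw [if_neg he]
      by_cases hA : W A r c
      · rw [if_pos hA, if_pos ⟨A, List.mem_cons_self, hA⟩]
      · rw [if_neg hA, if_neg (by
          rintro ⟨t, ht, hw⟩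
          rcases List.mem_cons.mp ht with rfl | ht'
          · exact hA hw
          · exact he ⟨t, ht', hw⟩)]

-- ---------- the four fill passes, in closed form ----------
abbrev pvR1 (x y d1 d2 r c : Int) : Prop := r < y ∧ c ≤ x + d1 ∧ r + c < x + y
abbrev pvR2 (x y d1 d2 r c : Int) : Prop := r ≤ y - d1 + d2 ∧ x + d1 < c ∧ x - y + 2 * d1 < c - r
abbrev pvR3 (x y d1 d2 r c : Int) : Prop :=
  y ≤ r ∧ c ≤ x + d2 + 1 ∧ (x ≤ c → c ≤ x + d2 → y + c - x < r) ∧ (c = x + d2 + 1 → y + d2 ≤ r)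
abbrev pvR4 (x y d1 d2 r c : Int) : Prop :=
  y - d1 + d2 + 1 ≤ r ∧ x + d2 ≤ c ∧ (r ≤ y + d2 → x + y + 2 * d2 - r < c)

theorem pvFill1_char (n x y d1 d2 : Int) (hd1 : 1 ≤ d1) (hd2 : 1 ≤ d2) (hx : 0 ≤ x)
    (hy : d1 ≤ y) (hyn : y + d2 < n) (hxn : x + d1 + d2 < n)
    {M : List (List Int)} {g : Int → Int → Int} (hWF : pvWF n M)
    (hchar : ∀ r c, 0 ≤ r → r < n → 0 ≤ c → c < n → pvMget M r c = g r c)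
    (hg5 : ∀ r c, 0 ≤ r → r < n → 0 ≤ c → c < n → (g r c = 5 ↔ pvBdry x y d1 d2 r c)) :
    pvWF n ((PySem.List.pyRange 0 (x + d1 + 1) 1).foldl
      (fun M c => pvScan 1 ((PySem.List.pyRange 0 y 1).map (fun r => (r, c))) M) M) ∧
    ∀ r c, 0 ≤ r → r < n → 0 ≤ c → c < n →
      pvMget ((PySem.List.pyRange 0 (x + d1 + 1) 1).foldl
          (fun M c => pvScan 1 ((PySem.List.pyRange 0 y 1).map (fun r => (r, c))) M) M) r c =
        if pvR1 x y d1 d2 r c then 1 else g r c := by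
  obtain ⟨hWFr, hcharr⟩ := pvFoldScan_char (n := n) 1 (by omega) 0 (x + d1 + 1)
    (fun t => (PySem.List.pyRange 0 y 1).map (fun r => (r, t)))
    (fun t r c => c = t ∧ 0 ≤ r ∧ r < y ∧ r + t < x + y)
    hWF hchar
    (by
      intro t ht1 ht2
      constructor
      · intro p hp
        simp only [List.mem_map, PySem.List.mem_pyRange_one] at hp
        obtain ⟨rr, hrr, rfl⟩ := hp
        simp only
        omega
      · exact List.Nodup.map (fun a b h => by injection h) (PySem.List.nodup_pyRange_one _ _))
    (by
      intro t t' ht1 ht2 ht3 ht4 hne p hp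
      simp only [List.mem_map, PySem.List.mem_pyRange_one] at hp
      obtain ⟨rr, hrr, rfl⟩ := hp
      simp only
      omega)
    (by
      intro t ht1 ht2 r c hr hr2 hc hc2
      rw [List.takeWhile_map]
      have hm : (PySem.List.pyRange 0 y 1).takeWhile
          ((fun p => !decide (g p.1 p.2 = 5)) ∘ (fun r => (r, t))) =
          PySem.List.pyRange 0 (if x < t then x + y - t else y) 1 := by
        refine pvTakeWhile_pyRange_one _ _ _ _ (by split_ifs <;> omega) (by split_ifs <;> omega) ?_ ?_
        · intro i hi0 him
          have hnb : ¬pvBdry x y d1 d2 i t := by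
            unfold pvBdry
            split_ifs at him <;> omega
          simp only [Function.comp_apply, Bool.not_eq_true', decide_eq_false_iff_not]
          intro h5
          exact hnb ((hg5 i t (by omega) (by split_ifs at him <;> omega) (by omega) (by omega)).mp h5)
        · intro hmy
          have hb : pvBdry x y d1 d2 (if x < t then x + y - t else y) t := by
            unfold pvBdry
            split_ifs at hmy ⊢ <;> omega
          simp only [Function.comp_apply]
          rw [(hg5 _ t (by split_ifs <;> omega) (by split_ifs <;> omega) (by omega) (by omega)).mpr hb]
          simp
      rw [hm]
      constructor
      · intro hmem
        simp only [List.mem_map, PySem.List.mem_pyRange_one] at hmem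
        obtain ⟨rr, hrr, heq⟩ := hmem
        rw [Prod.mk.injEq] at heq
        split_ifs at hrr <;> omega
      · intro hw
        simp only [List.mem_map, PySem.List.mem_pyRange_one]
        exact ⟨r, by split_ifs <;> omega, by rw [Prod.mk.injEq]; omega⟩)
  refine ⟨hWFr, ?_⟩
  intro r c hr hr2 hc hc2
  rw [hcharr r c hr hr2 hc hc2]
  have he : (∃ t ∈ PySem.List.pyRange 0 (x + d1 + 1) 1,
      c = t ∧ 0 ≤ r ∧ r < y ∧ r + t < x + y) ↔ pvR1 x y d1 d2 r c := by
    constructor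
    · rintro ⟨t, ht, h1, h2, h3, h4⟩
      rw [PySem.List.mem_pyRange_one] at ht
      unfold pvR1
      omega
    · intro hw
      unfold pvR1 at hw
      exact ⟨c, by rw [PySem.List.mem_pyRange_one]; omega, by omega⟩
  rw [if_congr he rfl rfl]

theorem pvFill2_char (n x y d1 d2 : Int) (hd1 : 1 ≤ d1) (hd2 : 1 ≤ d2) (hx : 0 ≤ x)
    (hy : d1 ≤ y) (hyn : y + d2 < n) (hxn : x + d1 + d2 < n)
    {M : List (List Int)} {g : Int → Int → Int} (hWF : pvWF n M)
    (hchar : ∀ r c, 0 ≤ r → r < n → 0 ≤ c → c < n → pvMget M r c = g r c)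
    (hg5 : ∀ r c, 0 ≤ r → r < n → 0 ≤ c → c < n → (g r c = 5 ↔ pvBdry x y d1 d2 r c)) :
    pvWF n ((PySem.List.pyRange 0 (y - d1 + d2 + 1) 1).foldl
      (fun M r => pvScan 2 ((PySem.List.pyRange (n - 1) (x + d1) (-1)).map (fun c => (r, c))) M) M) ∧
    ∀ r c, 0 ≤ r → r < n → 0 ≤ c → c < n →
      pvMget ((PySem.List.pyRange 0 (y - d1 + d2 + 1) 1).foldl
          (fun M r => pvScan 2 ((PySem.List.pyRange (n - 1) (x + d1) (-1)).map (fun c => (r, c))) M) M) r c =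
        if pvR2 x y d1 d2 r c then 2 else g r c := by
  obtain ⟨hWFr, hcharr⟩ := pvFoldScan_char (n := n) 2 (by omega) 0 (y - d1 + d2 + 1)
    (fun t => (PySem.List.pyRange (n - 1) (x + d1) (-1)).map (fun c => (t, c)))
    (fun t r c => r = t ∧ x + d1 < c ∧ c < n ∧ x - y + 2 * d1 < c - t)
    hWF hchar
    (by
      intro t ht1 ht2
      constructor
      · intro p hp
        simp only [List.mem_map, PySem.List.mem_pyRange_neg_one] at hp
        obtain ⟨u, hu, rfl⟩ := hp
        simp only
        omega
      · rw [PySem.List.pyRange_neg_one_eq_reverse]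
        exact List.Nodup.map (fun a b h => by injection h)
          (List.nodup_reverse.mpr (PySem.List.nodup_pyRange_one _ _)))
    (by
      intro t t' ht1 ht2 ht3 ht4 hne p hp
      simp only [List.mem_map, PySem.List.mem_pyRange_neg_one] at hp
      obtain ⟨u, hu, rfl⟩ := hp
      simp only
      omega)
    (by
      intro t ht1 ht2 r c hr hr2 hc hc2
      rw [List.takeWhile_map]
      have hm : (PySem.List.pyRange (n - 1) (x + d1) (-1)).takeWhile
          ((fun p => !decide (g p.1 p.2 = 5)) ∘ (fun c => (t, c))) =
          PySem.List.pyRange (n - 1) (if y - d1 ≤ t then x + 2 * d1 + t - y else x + d1) (-1) := by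
        refine pvTakeWhile_pyRange_neg_one _ _ _ _ (by split_ifs <;> omega) (by split_ifs <;> omega) ?_ ?_
        · intro i hi0 him
          have hnb : ¬pvBdry x y d1 d2 t i := by
            unfold pvBdry
            split_ifs at hi0 <;> omega
          simp only [Function.comp_apply, Bool.not_eq_true', decide_eq_false_iff_not]
          intro h5
          exact hnb ((hg5 t i (by split_ifs at hi0 <;> omega) (by omega)
            (by split_ifs at hi0 <;> omega) (by omega)).mp h5)
        · intro hmy
          have hb : pvBdry x y d1 d2 t (if y - d1 ≤ t then x + 2 * d1 + t - y else x + d1) := by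
            unfold pvBdry
            split_ifs at hmy ⊢ <;> omega
          simp only [Function.comp_apply]
          rw [(hg5 t (if y - d1 ≤ t then x + 2 * d1 + t - y else x + d1) (by split_ifs at hmy ⊢ <;> omega) (by split_ifs at hmy ⊢ <;> omega)
            (by split_ifs at hmy ⊢ <;> omega) (by split_ifs at hmy ⊢ <;> omega)).mpr hb]
          simp
      rw [hm]
      constructor
      · intro hmem
        simp only [List.mem_map, PySem.List.mem_pyRange_neg_one] at hmem
        obtain ⟨u, hu, heq⟩ := hmem
        rw [Prod.mk.injEq] at heq
        split_ifs at hu <;> omega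
      · intro hw
        simp only [List.mem_map, PySem.List.mem_pyRange_neg_one]
        exact ⟨c, by split_ifs <;> omega, by rw [Prod.mk.injEq]; omega⟩)
  refine ⟨hWFr, ?_⟩
  intro r c hr hr2 hc hc2
  rw [hcharr r c hr hr2 hc hc2]
  have he : (∃ t ∈ PySem.List.pyRange 0 (y - d1 + d2 + 1) 1, r = t ∧ x + d1 < c ∧ c < n ∧ x - y + 2 * d1 < c - t) ↔ pvR2 x y d1 d2 r c := by
    constructor
    · rintro ⟨t, ht, hw⟩
      rw [PySem.List.mem_pyRange_one] at ht
      unfold pvR2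
      omega
    · intro hw
      unfold pvR2 at hw
      exact ⟨r, by rw [PySem.List.mem_pyRange_one]; omega, by omega⟩
  rw [if_congr he rfl rfl]

theorem pvFill3_char (n x y d1 d2 : Int) (hd1 : 1 ≤ d1) (hd2 : 1 ≤ d2) (hx : 0 ≤ x)
    (hy : d1 ≤ y) (hyn : y + d2 < n) (hxn : x + d1 + d2 < n)
    {M : List (List Int)} {g : Int → Int → Int} (hWF : pvWF n M)
    (hchar : ∀ r c, 0 ≤ r → r < n → 0 ≤ c → c < n → pvMget M r c = g r c)
    (hg5 : ∀ r c, 0 ≤ r → r < n → 0 ≤ c → c < n → (g r c = 5 ↔ pvBdry x y d1 d2 r c)) :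
    pvWF n ((PySem.List.pyRange 0 (x + d2 + 2) 1).foldl
      (fun M c => pvScan 3 ((PySem.List.pyRange (n - 1) (y - 1) (-1)).map (fun r => (r, c))) M) M) ∧
    ∀ r c, 0 ≤ r → r < n → 0 ≤ c → c < n →
      pvMget ((PySem.List.pyRange 0 (x + d2 + 2) 1).foldl
          (fun M c => pvScan 3 ((PySem.List.pyRange (n - 1) (y - 1) (-1)).map (fun r => (r, c))) M) M) r c =
        if pvR3 x y d1 d2 r c then 3 else g r c := by
  obtain ⟨hWFr, hcharr⟩ := pvFoldScan_char (n := n) 3 (by omega) 0 (x + d2 + 2)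
    (fun t => (PySem.List.pyRange (n - 1) (y - 1) (-1)).map (fun r => (r, t)))
    (fun t r c => c = t ∧ y ≤ r ∧ r < n ∧ (x ≤ t → t ≤ x + d2 → y + t - x < r) ∧ (t = x + d2 + 1 → y + d2 ≤ r))
    hWF hchar
    (by
      intro t ht1 ht2
      constructor
      · intro p hp
        simp only [List.mem_map, PySem.List.mem_pyRange_neg_one] at hp
        obtain ⟨u, hu, rfl⟩ := hp
        simp only
        omega
      · rw [PySem.List.pyRange_neg_one_eq_reverse]
        exact List.Nodup.map (fun a b h => by injection h)
          (List.nodup_reverse.mpr (PySem.List.nodup_pyRange_one _ _)))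
    (by
      intro t t' ht1 ht2 ht3 ht4 hne p hp
      simp only [List.mem_map, PySem.List.mem_pyRange_neg_one] at hp
      obtain ⟨u, hu, rfl⟩ := hp
      simp only
      omega)
    (by
      intro t ht1 ht2 r c hr hr2 hc hc2
      rw [List.takeWhile_map]
      have hm : (PySem.List.pyRange (n - 1) (y - 1) (-1)).takeWhile
          ((fun p => !decide (g p.1 p.2 = 5)) ∘ (fun r => (r, t))) =
          PySem.List.pyRange (n - 1) (if x ≤ t ∧ t ≤ x + d2 then y + t - x else if t = x + d2 + 1 then y + d2 - 1 else y - 1) (-1) := by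
        refine pvTakeWhile_pyRange_neg_one _ _ _ _ (by split_ifs <;> omega) (by split_ifs <;> omega) ?_ ?_
        · intro i hi0 him
          have hnb : ¬pvBdry x y d1 d2 i t := by
            unfold pvBdry
            split_ifs at hi0 <;> omega
          simp only [Function.comp_apply, Bool.not_eq_true', decide_eq_false_iff_not]
          intro h5
          exact hnb ((hg5 i t (by split_ifs at hi0 <;> omega) (by omega)
            (by split_ifs at hi0 <;> omega) (by omega)).mp h5)
        · intro hmy
          have hb : pvBdry x y d1 d2 (if x ≤ t ∧ t ≤ x + d2 then y + t - x else if t = x + d2 + 1 then y + d2 - 1 else y - 1) t := by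
            unfold pvBdry
            split_ifs at hmy ⊢ <;> omega
          simp only [Function.comp_apply]
          rw [(hg5 (if x ≤ t ∧ t ≤ x + d2 then y + t - x else if t = x + d2 + 1 then y + d2 - 1 else y - 1) t (by split_ifs at hmy ⊢ <;> omega) (by split_ifs at hmy ⊢ <;> omega)
            (by split_ifs at hmy ⊢ <;> omega) (by split_ifs at hmy ⊢ <;> omega)).mpr hb]
          simp
      rw [hm]
      constructor
      · intro hmem
        simp only [List.mem_map, PySem.List.mem_pyRange_neg_one] at hmem
        obtain ⟨u, hu, heq⟩ := hmem
        rw [Prod.mk.injEq] at heq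
        split_ifs at hu <;> omega
      · intro hw
        simp only [List.mem_map, PySem.List.mem_pyRange_neg_one]
        exact ⟨r, by split_ifs <;> omega, by rw [Prod.mk.injEq]; omega⟩)
  refine ⟨hWFr, ?_⟩
  intro r c hr hr2 hc hc2
  rw [hcharr r c hr hr2 hc hc2]
  have he : (∃ t ∈ PySem.List.pyRange 0 (x + d2 + 2) 1, c = t ∧ y ≤ r ∧ r < n ∧ (x ≤ t → t ≤ x + d2 → y + t - x < r) ∧ (t = x + d2 + 1 → y + d2 ≤ r)) ↔ pvR3 x y d1 d2 r c := by
    constructor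
    · rintro ⟨t, ht, hw⟩
      rw [PySem.List.mem_pyRange_one] at ht
      unfold pvR3
      omega
    · intro hw
      unfold pvR3 at hw
      exact ⟨c, by rw [PySem.List.mem_pyRange_one]; omega, by omega⟩
  rw [if_congr he rfl rfl]

theorem pvFill4_char (n x y d1 d2 : Int) (hd1 : 1 ≤ d1) (hd2 : 1 ≤ d2) (hx : 0 ≤ x)
    (hy : d1 ≤ y) (hyn : y + d2 < n) (hxn : x + d1 + d2 < n)
    {M : List (List Int)} {g : Int → Int → Int} (hWF : pvWF n M)
    (hchar : ∀ r c, 0 ≤ r → r < n → 0 ≤ c → c < n → pvMget M r c = g r c)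
    (hg5 : ∀ r c, 0 ≤ r → r < n → 0 ≤ c → c < n → (g r c = 5 ↔ pvBdry x y d1 d2 r c)) :
    pvWF n ((PySem.List.pyRange (y - d1 + d2 + 1) n 1).foldl
      (fun M r => pvScan 4 ((PySem.List.pyRange (n - 1) (x + d2 - 1) (-1)).map (fun c => (r, c))) M) M) ∧
    ∀ r c, 0 ≤ r → r < n → 0 ≤ c → c < n →
      pvMget ((PySem.List.pyRange (y - d1 + d2 + 1) n 1).foldl
          (fun M r => pvScan 4 ((PySem.List.pyRange (n - 1) (x + d2 - 1) (-1)).map (fun c => (r, c))) M) M) r c =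
        if pvR4 x y d1 d2 r c then 4 else g r c := by
  obtain ⟨hWFr, hcharr⟩ := pvFoldScan_char (n := n) 4 (by omega) (y - d1 + d2 + 1) n
    (fun t => (PySem.List.pyRange (n - 1) (x + d2 - 1) (-1)).map (fun c => (t, c)))
    (fun t r c => r = t ∧ x + d2 ≤ c ∧ c < n ∧ (t ≤ y + d2 → x + y + 2 * d2 - t < c))
    hWF hchar
    (by
      intro t ht1 ht2
      constructor
      · intro p hp
        simp only [List.mem_map, PySem.List.mem_pyRange_neg_one] at hp
        obtain ⟨u, hu, rfl⟩ := hp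
        simp only
        omega
      · rw [PySem.List.pyRange_neg_one_eq_reverse]
        exact List.Nodup.map (fun a b h => by injection h)
          (List.nodup_reverse.mpr (PySem.List.nodup_pyRange_one _ _)))
    (by
      intro t t' ht1 ht2 ht3 ht4 hne p hp
      simp only [List.mem_map, PySem.List.mem_pyRange_neg_one] at hp
      obtain ⟨u, hu, rfl⟩ := hp
      simp only
      omega)
    (by
      intro t ht1 ht2 r c hr hr2 hc hc2
      rw [List.takeWhile_map]
      have hm : (PySem.List.pyRange (n - 1) (x + d2 - 1) (-1)).takeWhile
          ((fun p => !decide (g p.1 p.2 = 5)) ∘ (fun c => (t, c))) =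
          PySem.List.pyRange (n - 1) (if t ≤ y + d2 then x + y + 2 * d2 - t else x + d2 - 1) (-1) := by
        refine pvTakeWhile_pyRange_neg_one _ _ _ _ (by split_ifs <;> omega) (by split_ifs <;> omega) ?_ ?_
        · intro i hi0 him
          have hnb : ¬pvBdry x y d1 d2 t i := by
            unfold pvBdry
            split_ifs at hi0 <;> omega
          simp only [Function.comp_apply, Bool.not_eq_true', decide_eq_false_iff_not]
          intro h5
          exact hnb ((hg5 t i (by split_ifs at hi0 <;> omega) (by omega)
            (by split_ifs at hi0 <;> omega) (by omega)).mp h5)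
        · intro hmy
          have hb : pvBdry x y d1 d2 t (if t ≤ y + d2 then x + y + 2 * d2 - t else x + d2 - 1) := by
            unfold pvBdry
            split_ifs at hmy ⊢ <;> omega
          simp only [Function.comp_apply]
          rw [(hg5 t (if t ≤ y + d2 then x + y + 2 * d2 - t else x + d2 - 1) (by split_ifs at hmy ⊢ <;> omega) (by split_ifs at hmy ⊢ <;> omega)
            (by split_ifs at hmy ⊢ <;> omega) (by split_ifs at hmy ⊢ <;> omega)).mpr hb]
          simp
      rw [hm]
      constructor
      · intro hmem
        simp only [List.mem_map, PySem.List.mem_pyRange_neg_one] at hmem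
        obtain ⟨u, hu, heq⟩ := hmem
        rw [Prod.mk.injEq] at heq
        split_ifs at hu <;> omega
      · intro hw
        simp only [List.mem_map, PySem.List.mem_pyRange_neg_one]
        exact ⟨c, by split_ifs <;> omega, by rw [Prod.mk.injEq]; omega⟩)
  refine ⟨hWFr, ?_⟩
  intro r c hr hr2 hc hc2
  rw [hcharr r c hr hr2 hc hc2]
  have he : (∃ t ∈ PySem.List.pyRange (y - d1 + d2 + 1) n 1, r = t ∧ x + d2 ≤ c ∧ c < n ∧ (t ≤ y + d2 → x + y + 2 * d2 - t < c)) ↔ pvR4 x y d1 d2 r c := by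
    constructor
    · rintro ⟨t, ht, hw⟩
      rw [PySem.List.mem_pyRange_one] at ht
      unfold pvR4
      omega
    · intro hw
      unfold pvR4 at hw
      exact ⟨r, by rw [PySem.List.mem_pyRange_one]; omega, by omega⟩
  rw [if_congr he rfl rfl]

-- ---------- population pass and assembly ----------
theorem pvFoldl_length {α : Type} (f : List Int → α → List Int) (l : List α) (init : List Int)
    (h : ∀ acc a, (f acc a).length = acc.length) : (l.foldl f init).length = init.length := by
  induction l generalizing init with
  | nil => rfl
  | cons a l ih => rw [List.foldl_cons, ih (f init a), h init a]

theorem pvMaxMin_nonneg (res : List Int) (hne : res ≠ []) :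
    0 ≤ (PySem.List.max? res (fun a => a)).getD 0 - (PySem.List.min? res (fun a => a)).getD 0 := by
  cases hmx : PySem.List.max? res (fun a => a) with
  | none => exact absurd ((PySem.List.max?_eq_none_iff res _).mp hmx) hne
  | some mx =>
    cases hmn : PySem.List.min? res (fun a => a) with
    | none => exact absurd ((PySem.List.min?_eq_none_iff res _).mp hmn) hne
    | some mn =>
      have h1 : mn ≤ mx := PySem.List.max?_isMax hmx mn (PySem.List.min?_mem hmn)
      simp only [Option.getD_some]
      omega

theorem pvResMM_nonneg (n : Int) (lst : List (List Int)) (M4 : List (List Int)) :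
    0 ≤ (PySem.List.max? ((PySem.List.pyRange 0 n 1).foldl (fun res r =>
          (PySem.List.pyRange 0 n 1).foldl (fun res c =>
            if pvMget M4 r c = 0 ∨ pvMget M4 r c = 5 then
              PySem.List.pySetD res 0
                (PySem.List.pyGetD res 0 0 + PySem.List.pyGetD (PySem.List.pyGetD lst r []) c 0)
            else
              PySem.List.pySetD res (pvMget M4 r c)
                (PySem.List.pyGetD res (pvMget M4 r c) 0 +
                  PySem.List.pyGetD (PySem.List.pyGetD lst r []) c 0)) res)
          ([0, 0, 0, 0, 0] : List Int)) (fun a => a)).getD 0 -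
        (PySem.List.min? ((PySem.List.pyRange 0 n 1).foldl (fun res r =>
          (PySem.List.pyRange 0 n 1).foldl (fun res c =>
            if pvMget M4 r c = 0 ∨ pvMget M4 r c = 5 then
              PySem.List.pySetD res 0
                (PySem.List.pyGetD res 0 0 + PySem.List.pyGetD (PySem.List.pyGetD lst r []) c 0)
            else
              PySem.List.pySetD res (pvMget M4 r c)
                (PySem.List.pyGetD res (pvMget M4 r c) 0 +
                  PySem.List.pyGetD (PySem.List.pyGetD lst r []) c 0)) res)
          ([0, 0, 0, 0, 0] : List Int)) (fun a => a)).getD 0 := by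
  apply pvMaxMin_nonneg
  intro hnil
  have hlen : ((PySem.List.pyRange 0 n 1).foldl (fun res r =>
      (PySem.List.pyRange 0 n 1).foldl (fun res c =>
        if pvMget M4 r c = 0 ∨ pvMget M4 r c = 5 then
          PySem.List.pySetD res 0
            (PySem.List.pyGetD res 0 0 + PySem.List.pyGetD (PySem.List.pyGetD lst r []) c 0)
        else
          PySem.List.pySetD res (pvMget M4 r c)
            (PySem.List.pyGetD res (pvMget M4 r c) 0 +
              PySem.List.pyGetD (PySem.List.pyGetD lst r []) c 0)) res)
      ([0, 0, 0, 0, 0] : List Int)).length = 5 := by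
    apply pvFoldl_length
    intro acc r
    apply pvFoldl_length
    intro acc2 c
    split_ifs <;> rw [PySem.List.length_pySetD]
  rw [hnil] at hlen
  simp at hlen

theorem pvAfter_nonneg (n : Int) (lst : List (List Int)) (x y d1 d2 : Int) (Mb : List (List Int)) :
    0 ≤ pvAfter n lst x y d1 d2 Mb := by
  simp only [pvAfter]
  exact pvResMM_nonneg n lst _

theorem pvInvalid_eq (n : Int) (lst : List (List Int)) (x y d1 d2 : Int)
    (h : Invalid_gerry n x y d1 d2) : gerry n lst x y d1 d2 = -1 := by
  simp only [gerry]
  rw [pvChain_none n x y d1 d2 _ h]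

theorem pvAltNeg (n : Int) (lst : List (List Int)) (x y d1 d2 : Int)
    (h : ¬(1 ≤ d1 ∧ 1 ≤ d2 ∧ 0 ≤ x ∧ d1 ≤ y ∧ y + d2 < n ∧ x + d1 + d2 < n)) :
    gerry_alt n lst x y d1 d2 = -1 := by
  simp only [gerry_alt]
  rw [if_neg h]

theorem pvGerry_nonneg (n : Int) (lst : List (List Int)) (x y d1 d2 : Int)
    (h : ¬Invalid_gerry n x y d1 d2) : 0 ≤ gerry n lst x y d1 d2 := by
  obtain ⟨Mb, hMb, _, _⟩ := pvBorders_char n x y d1 d2 h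
  simp only [gerry]
  rw [hMb]
  exact pvAfter_nonneg n lst x y d1 d2 Mb

set_option maxHeartbeats 2000000 in
theorem pvClassify_eq (n x y d1 d2 r c : Int) (hd1 : 1 ≤ d1) (hd2 : 1 ≤ d2) (hx : 0 ≤ x)
    (hy : d1 ≤ y) (hyn : y + d2 < n) (hxn : x + d1 + d2 < n)
    (hr : 0 ≤ r) (hr2 : r < n) (hc : 0 ≤ c) (hc2 : c < n) :
    (if (if pvR4 x y d1 d2 r c then (4:Int) else if pvR3 x y d1 d2 r c then 3 else if pvR2 x y d1 d2 r c then 2 else if pvR1 x y d1 d2 r c then 1 else if pvBdry x y d1 d2 r c then 5 else 0) = 0 ∨ (if pvR4 x y d1 d2 r c then (4:Int) else if pvR3 x y d1 d2 r c then 3 else if pvR2 x y d1 d2 r c then 2 else if pvR1 x y d1 d2 r c then 1 else if pvBdry x y d1 d2 r c then 5 else 0) = 5 then (0 : Int) else (if pvR4 x y d1 d2 r c then (4:Int) else if pvR3 x y d1 d2 r c then 3 else if pvR2 x y d1 d2 r c then 2 else if pvR1 x y d1 d2 r c then 1 else if pvBdry x y d1 d2 r c then 5 else 0)) = pvClassify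 x y d1 d2 r c := by
  unfold pvClassify pvR1 pvR2 pvR3 pvR4 pvBdry
  split_ifs <;> omega

theorem pvSumEq (l : List Int) (f g : List Int → Int → List Int) (init : List Int)
    (h : ∀ acc, ∀ t ∈ l, f acc t = g acc t) :
    (PySem.List.max? (l.foldl f init) (fun a => a)).getD 0 -
      (PySem.List.min? (l.foldl f init) (fun a => a)).getD 0 =
    (PySem.List.max? (l.foldl g init) (fun a => a)).getD 0 -
      (PySem.List.min? (l.foldl g init) (fun a => a)).getD 0 := by
  rw [PySem.List.foldl_congr_mem l f g init h]

theorem pvValid_eq (n : Int) (lst : List (List Int)) (x y d1 d2 : Int)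
    (hd1 : 1 ≤ d1) (hd2 : 1 ≤ d2) (hx : 0 ≤ x) (hy : d1 ≤ y)
    (hyn : y + d2 < n) (hxn : x + d1 + d2 < n) :
    gerry n lst x y d1 d2 = gerry_alt n lst x y d1 d2 := by
  have hni : ¬Invalid_gerry n x y d1 d2 := by unfold Invalid_gerry; omega
  obtain ⟨Mb, hMb, hWb, hcb⟩ := pvBorders_char n x y d1 d2 hni
  simp only [gerry]
  rw [hMb]
  show pvAfter n lst x y d1 d2 Mb = _
  have hG0 : ∀ r c, 0 ≤ r → r < n → 0 ≤ c → c < n →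
      ((if pvBdry x y d1 d2 r c then (5 : Int) else 0) = 5 ↔ pvBdry x y d1 d2 r c) := by
    intro r c _ _ _ _
    split_ifs with h
    · simp [h]
    · simp [h]
  obtain ⟨hWF1, hchar1⟩ := pvFill1_char n x y d1 d2 hd1 hd2 hx hy hyn hxn hWb hcb hG0
  have hchar1' : ∀ r c, 0 ≤ r → r < n → 0 ≤ c → c < n →
      pvMget ((PySem.List.pyRange 0 (x + d1 + 1) 1).foldl
        (fun M c => pvScan 1 ((PySem.List.pyRange 0 y 1).map (fun r => (r, c))) M) Mb) r c =
      if pvR1 x y d1 d2 r c then 1 else if pvBdry x y d1 d2 r c then 5 else 0 := by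
    intro r c h1 h2 h3 h4
    rw [hchar1 r c h1 h2 h3 h4]
  have hG1 : ∀ r c, 0 ≤ r → r < n → 0 ≤ c → c < n →
      ((if pvR1 x y d1 d2 r c then (1 : Int) else if pvBdry x y d1 d2 r c then 5 else 0) = 5 ↔
        pvBdry x y d1 d2 r c) := by
    intro r c _ _ _ _
    unfold pvR1 pvBdry
    split_ifs <;> omega
  obtain ⟨hWF2, hchar2⟩ := pvFill2_char n x y d1 d2 hd1 hd2 hx hy hyn hxn hWF1 hchar1' hG1
  have hchar2' : ∀ r c, 0 ≤ r → r < n → 0 ≤ c → c < n →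
      pvMget ((PySem.List.pyRange 0 (y - d1 + d2 + 1) 1).foldl
        (fun r_1 => (fun M r => pvScan 2 ((PySem.List.pyRange (n - 1) (x + d1) (-1)).map (fun c => (r, c))) M) r_1)
        ((PySem.List.pyRange 0 (x + d1 + 1) 1).foldl
          (fun M c => pvScan 1 ((PySem.List.pyRange 0 y 1).map (fun r => (r, c))) M) Mb)) r c =
      if pvR2 x y d1 d2 r c then 2
      else if pvR1 x y d1 d2 r c then 1 else if pvBdry x y d1 d2 r c then 5 else 0 := by
    intro r c h1 h2 h3 h4
    rw [hchar2 r c h1 h2 h3 h4]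
  have hG2 : ∀ r c, 0 ≤ r → r < n → 0 ≤ c → c < n →
      ((if pvR2 x y d1 d2 r c then (2 : Int)
        else if pvR1 x y d1 d2 r c then 1 else if pvBdry x y d1 d2 r c then 5 else 0) = 5 ↔
        pvBdry x y d1 d2 r c) := by
    intro r c _ _ _ _
    unfold pvR1 pvR2 pvBdry
    split_ifs <;> omega
  obtain ⟨hWF3, hchar3⟩ := pvFill3_char n x y d1 d2 hd1 hd2 hx hy hyn hxn hWF2 hchar2' hG2
  have hchar3' : ∀ r c, 0 ≤ r → r < n → 0 ≤ c → c < n →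
      pvMget ((PySem.List.pyRange 0 (x + d2 + 2) 1).foldl
        (fun M c => pvScan 3 ((PySem.List.pyRange (n - 1) (y - 1) (-1)).map (fun r => (r, c))) M)
        ((PySem.List.pyRange 0 (y - d1 + d2 + 1) 1).foldl
          (fun M r => pvScan 2 ((PySem.List.pyRange (n - 1) (x + d1) (-1)).map (fun c => (r, c))) M)
          ((PySem.List.pyRange 0 (x + d1 + 1) 1).foldl
            (fun M c => pvScan 1 ((PySem.List.pyRange 0 y 1).map (fun r => (r, c))) M) Mb))) r c =
      if pvR3 x y d1 d2 r c then 3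
      else if pvR2 x y d1 d2 r c then 2
      else if pvR1 x y d1 d2 r c then 1 else if pvBdry x y d1 d2 r c then 5 else 0 := by
    intro r c h1 h2 h3 h4
    rw [hchar3 r c h1 h2 h3 h4]
  have hG3 : ∀ r c, 0 ≤ r → r < n → 0 ≤ c → c < n →
      ((if pvR3 x y d1 d2 r c then (3 : Int)
        else if pvR2 x y d1 d2 r c then 2
        else if pvR1 x y d1 d2 r c then 1 else if pvBdry x y d1 d2 r c then 5 else 0) = 5 ↔
        pvBdry x y d1 d2 r c) := by
    intro r c _ _ _ _
    unfold pvR1 pvR2 pvR3 pvBdry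
    split_ifs <;> omega
  obtain ⟨hWF4, hchar4⟩ := pvFill4_char n x y d1 d2 hd1 hd2 hx hy hyn hxn hWF3 hchar3' hG3
  simp only [pvAfter, gerry_alt]
  rw [if_pos ⟨hd1, hd2, hx, hy, hyn, hxn⟩]
  refine pvSumEq _ _ _ _ ?_
  intro acc r hrmem
  rw [PySem.List.mem_pyRange_one] at hrmem
  beta_reduce
  refine PySem.List.foldl_congr_mem _ _ _ _ ?_
  intro acc2 c hcmem
  rw [PySem.List.mem_pyRange_one] at hcmem
  simp only [hchar4 r c (by omega) (by omega) (by omega) (by omega)]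
  have hcl := pvClassify_eq n x y d1 d2 r c hd1 hd2 hx hy hyn hxn
    (by omega) (by omega) (by omega) (by omega)
  by_cases h05 : (if pvR4 x y d1 d2 r c then (4:Int) else if pvR3 x y d1 d2 r c then 3 else if pvR2 x y d1 d2 r c then 2 else if pvR1 x y d1 d2 r c then 1 else if pvBdry x y d1 d2 r c then 5 else 0) = 0 ∨ (if pvR4 x y d1 d2 r c then (4:Int) else if pvR3 x y d1 d2 r c then 3 else if pvR2 x y d1 d2 r c then 2 else if pvR1 x y d1 d2 r c then 1 else if pvBdry x y d1 d2 r c then 5 else 0) = 5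
  · rw [if_pos h05] at hcl ⊢
    rw [← hcl]
  · rw [if_neg h05] at hcl ⊢
    rw [← hcl]

-- ===== VERDICT (by name: the statement is the Claim_ definition above) =====
theorem gerry_spec : Claim_unchanged_gerry := by
  intro n lst x y d1 d2 hDom hPre hnD
  by_cases hInv : Invalid_gerry n x y d1 d2
  · rw [pvInvalid_eq n lst x y d1 d2 hInv,
      pvAltNeg n lst x y d1 d2 (by unfold Invalid_gerry at hInv; omega)]
  · have hd12 : 1 ≤ d1 ∧ 1 ≤ d2 := by
      by_contra hcon
      exact hnD ⟨by omega, hInv⟩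
    unfold Invalid_gerry at hInv
    exact pvValid_eq n lst x y d1 d2 (by omega) (by omega) (by omega) (by omega) (by omega) (by omega)

set_option maxRecDepth 100000 in
theorem gerry_changed : Claim_changed_gerry := by unfold Claim_changed_gerry; decide

theorem gerry_tight : Claim_exact_gerry := by
  intro n lst x y d1 d2 hDom hPre hD
  obtain ⟨hdle, hInv⟩ := hD
  rw [pvAltNeg n lst x y d1 d2 (by omega)]
  have := pvGerry_nonneg n lst x y d1 d2 hInv
  omega
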